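-- pv_equiv track=rewrite | github.com/pypi-data/pypi-mirror-210 | packages/microarch/microarch-0.1.1.tar.gz/microarch-0.1.1/microarch.py | base58_flex_decode
-- ===== SOURCE A (Python) =====
-- base58_charset = '123456789abcdefghijkmnopqrstuvwxyzABCDEFGHJKLMNPQRSTUVWXYZ'
--
-- def base58_flex_decode(enc, chrset=base58_charset):
--     """\
--     Returns the 'chrset'-decoded value of 'enc'. Of course this needs to use
--     the exact same charset as when to encoding the value.
--
--     :param enc: base-* encoded value to decode
--     :param chrset: the character-set used for original encoding of 'enc' value
--
--     Note: Did you read the 'encode' note above? Splendid, now have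
--              some fun... somewhere...
--
--     """
--     basect = len(chrset)
--     decoded = 0
--
--     for e, c in enumerate(enc[::-1]):
--         index = -1
--         try:
--             index = chrset.index(c)
--         except ValueError:
--             return None
--
--         decoded += ((basect**e) * index)
--
--     return decoded
-- ===== SOURCE B (Python) =====
-- base58_charset = '123456789abcdefghijkmnopqrstuvwxyzABCDEFGHJKLMNPQRSTUVWXYZ'
--
-- def base58_flex_decode(enc, chrset=base58_charset):
--     # Precompute char -> first-occurrence index once, then Horner evaluation
--     # left-to-right (decoded = decoded*base + digit): O(n + m) instead of
--     # recomputing chrset.index and basect**e for every character.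
--     idx = {}
--     for i, c in enumerate(chrset):
--         idx.setdefault(c, i)
--     basect = len(chrset)
--     decoded = 0
--     for c in enc:
--         i = idx.get(c)
--         if i is None:
--             return None
--         decoded = decoded * basect + i
--     return decoded
-- ===== Notes on version B (the rewrite author's own statement) =====
-- stated objective: faster
-- what changed: Replaces per-character chrset.index scans and basect**e big-power multiplications over the reversed string with a precomputed char->index dict and a single left-to-right Horner pass (decoded = decoded*base + digit).
import Mathlib
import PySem

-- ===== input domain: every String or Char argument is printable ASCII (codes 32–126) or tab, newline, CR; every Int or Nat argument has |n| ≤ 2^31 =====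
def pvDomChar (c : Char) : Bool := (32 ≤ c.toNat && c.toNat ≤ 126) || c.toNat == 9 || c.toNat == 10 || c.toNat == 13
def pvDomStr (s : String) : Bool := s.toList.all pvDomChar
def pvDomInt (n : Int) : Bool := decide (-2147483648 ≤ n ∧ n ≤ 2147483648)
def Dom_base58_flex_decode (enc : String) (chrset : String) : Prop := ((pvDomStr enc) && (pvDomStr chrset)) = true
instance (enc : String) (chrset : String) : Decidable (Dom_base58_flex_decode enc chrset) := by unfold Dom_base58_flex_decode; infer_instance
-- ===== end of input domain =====

-- B replaces A's per-character chrset.index scan and basect**e power with a precomputed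
-- char->index dict and a single left-to-right Horner pass (objective: faster).

-- ===== PORT A =====
-- loop 'for e, c in enumerate(enc[::-1])': structural recursion carrying the counter e
-- and the accumulator 'decoded'; chrset.index(c) for a single char c is exactly
-- PySem.List.index? on the char list (ValueError -> none -> early return None).
def pvGoA (chrsetL : List Char) (b : Int) : List Char → Nat → Int → Option Int
  | [], _, decoded => some decoded
  | c :: rest, e, decoded =>
    match PySem.List.index? chrsetL c with
    | none => none
    | some i => pvGoA chrsetL b rest (e + 1) (decoded + b ^ e * (i : Int))

def base58_flex_decode (enc : String) (chrset : String) : Option Int :=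
  -- enc[::-1] is exactly list reversal
  pvGoA chrset.toList (chrset.toList.length : Int) enc.toList.reverse 0 0

-- ===== PORT B =====
-- 'for i, c in enumerate(chrset): idx.setdefault(c, i)'
def pvBuildIdx : List Char → Nat → PySem.Dict Char Int → PySem.Dict Char Int
  | [], _, d => d
  | c :: rest, i, d =>
    pvBuildIdx rest (i + 1) (if d.contains c then d else d.insert c (i : Int))

-- Horner loop: 'decoded = decoded * basect + i', early return None on a missing char
def pvGoB (d : PySem.Dict Char Int) (b : Int) : List Char → Int → Option Int
  | [], decoded => some decoded
  | c :: rest, decoded =>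
    match d.get? c with
    | none => none
    | some i => pvGoB d b rest (decoded * b + i)

def base58_flex_decode_alt (enc : String) (chrset : String) : Option Int :=
  pvGoB (pvBuildIdx chrset.toList 0 PySem.Dict.empty) (chrset.toList.length : Int) enc.toList 0

-- ===== PRECONDITION & SPEC =====
def Spec_base58_flex_decode (enc : String) (chrset : String) (out : Option Int) : Prop := out = base58_flex_decode_alt enc chrset
instance (enc : String) (chrset : String) (out : Option Int) : Decidable (Spec_base58_flex_decode enc chrset out) := by unfold Spec_base58_flex_decode; infer_instance

-- ===== CLAIM (what is proved, stated in full; the proofs are below) =====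
def Claim_equal_base58_flex_decode : Prop := ∀ (enc : String) (chrset : String), Dom_base58_flex_decode enc chrset → Spec_base58_flex_decode enc chrset (base58_flex_decode enc chrset)

-- ===== LEMMAS AND PROOFS =====

-- the dict built by pvBuildIdx looks up the FIRST index of c in cs (offset by i), like str.index
theorem pvBuildIdx_get? (cs : List Char) (i : Nat) (d : PySem.Dict Char Int) (c : Char) :
    (pvBuildIdx cs i d).get? c =
      ((d.get? c).orElse (fun _ => (PySem.List.index? cs c).map (fun k => ((i + k : Nat) : Int)))) := by
  induction cs generalizing i d with
  | nil =>
    simp [pvBuildIdx, PySem.List.index?]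
  | cons c' rest ih =>
    simp only [pvBuildIdx]
    by_cases hc : c' = c
    · subst hc
      cases hmem : d.contains c' with
      | true =>
        have hsome : (d.get? c').isSome := by
          rcases Option.eq_none_or_eq_some (d.get? c') with h | ⟨v, h⟩
          · rw [PySem.Dict.get?_eq_none_iff_contains] at h; rw [h] at hmem; cases hmem
          · simp [h]
        simp only [hmem, if_true]
        rw [ih]
        rcases Option.isSome_iff_exists.mp hsome with ⟨v, hv⟩
        simp [hv, Option.orElse]
      | false =>
        have hnone : d.get? c' = none := (PySem.Dict.get?_eq_none_iff_contains d c').mpr hmem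
        simp only [hmem, Bool.false_eq_true, if_false]
        rw [ih]
        rw [PySem.List.index?_cons_self]
        simp [hnone, PySem.Dict.get?_insert_self, Option.orElse]
    · rw [PySem.List.index?_cons_of_ne rest hc]
      cases hmem : d.contains c' with
      | true =>
        simp only [hmem, if_true]
        rw [ih]
        cases d.get? c <;> cases h : PySem.List.index? rest c <;>
          simp [h, Option.orElse, Nat.add_assoc, Nat.add_comm 1]
      | false =>
        simp only [hmem, Bool.false_eq_true, if_false]
        rw [ih]
        rw [PySem.Dict.get?_insert_of_ne d _ (Ne.symm hc)]
        cases d.get? c <;> cases h : PySem.List.index? rest c <;>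
          simp [h, Option.orElse, Nat.add_assoc, Nat.add_comm 1]

-- processing an appended list with pvGoA threads the counter and accumulator through
theorem pvGoA_append (cs : List Char) (b : Int) (xs ys : List Char) (e : Nat) (dec : Int) :
    pvGoA cs b (xs ++ ys) e dec =
      match pvGoA cs b xs e dec with
      | none => none
      | some dec' => pvGoA cs b ys (e + xs.length) dec' := by
  induction xs generalizing e dec with
  | nil => simp [pvGoA]
  | cons c rest ih =>
    simp only [List.cons_append, pvGoA]
    cases PySem.List.index? cs c with
    | none => rfl
    | some i =>
      dsimp only
      rw [ih]
      have h : e + 1 + rest.length = e + (c :: rest).length := by simp; omega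
      rw [h]

-- pvGoB's accumulator shifts out of the result (multiplied by b ^ length)
theorem pvGoB_shift (d : PySem.Dict Char Int) (b : Int) (l : List Char) (dec : Int) :
    pvGoB d b l dec = (pvGoB d b l 0).map (fun v => dec * b ^ l.length + v) := by
  induction l generalizing dec with
  | nil => simp [pvGoB]
  | cons c rest ih =>
    simp only [pvGoB]
    cases d.get? c with
    | none => rfl
    | some i =>
      dsimp only
      rw [ih (dec * b + i), ih (0 * b + i)]
      cases pvGoB d b rest 0 with
      | none => rfl
      | some v => simp only [Option.map_some, List.length_cons]; congr 1; ring

-- main: A's reversed positional-power sum equals B's Horner pass, given the lookups agree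
theorem pvMain (cs : List Char) (b : Int) (d : PySem.Dict Char Int)
    (hd : ∀ c, d.get? c = (PySem.List.index? cs c).map (fun k => (k : Int)))
    (l : List Char) :
    pvGoA cs b l.reverse 0 0 = pvGoB d b l 0 := by
  induction l with
  | nil => simp [pvGoA, pvGoB]
  | cons c rest ih =>
    have hrev : (c :: rest).reverse = rest.reverse ++ [c] := by simp
    rw [hrev, pvGoA_append, ih]
    cases hI : PySem.List.index? cs c with
    | none =>
      have hg : d.get? c = none := by rw [hd c, hI]; rfl
      cases hA : pvGoB d b rest 0 with
      | none => simp [pvGoB, hg]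
      | some v =>
        have hI' : List.idxOf? c cs = none := by
          rw [PySem.List.index?_eq_idxOf?] at hI; exact hI
        simp [pvGoB, hg, pvGoA, hI']
    | some i =>
      have hg : d.get? c = some (i : Int) := by rw [hd c, hI]; rfl
      cases hA : pvGoB d b rest 0 with
      | none =>
        simp only [pvGoB, hg]
        rw [pvGoB_shift, hA]
        rfl
      | some v =>
        simp only [pvGoB, hg]
        rw [pvGoB_shift, hA]
        simp only [pvGoA, hI, Option.map_some, List.length_reverse]
        congr 1
        ring

theorem base58_flex_decode_eq (enc chrset : String) :
    base58_flex_decode enc chrset = base58_flex_decode_alt enc chrset := by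
  unfold base58_flex_decode base58_flex_decode_alt
  apply pvMain
  intro c
  rw [pvBuildIdx_get?]
  have hempty : (PySem.Dict.empty : PySem.Dict Char Int).get? c = none := by
    simp [PySem.Dict.get?, PySem.Dict.empty]
  rw [hempty]
  cases PySem.List.index? chrset.toList c <;> simp [Option.orElse]

-- ===== VERDICT (by name: the statement is the Claim_ definition above) =====
theorem base58_flex_decode_spec : Claim_equal_base58_flex_decode := by
  intro enc chrset _
  unfold Spec_base58_flex_decode
  exact base58_flex_decode_eq enc chrset
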